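-- pv_equiv track=rewrite | github.com/nick331999/shuttheboxhelper | optimal_move.py | get_flipped
-- ===== SOURCE A (Python) =====
-- def get_flipped(available_nums: [int]) -> str:
--     """Gets flipped nums from available nums.
--     Then sorts the nums and puts them into one string
--
--     """
--     flipped_nums = [1,2,3,4,5,6,7,8,9]
--     flipped_str = ''
--     for num in available_nums:
--         if num in flipped_nums:
--             flipped_nums.remove(num)
--     for num in flipped_nums:
--         flipped_str += str(num)
--     if flipped_str == '':
--         return '0'
--     return flipped_str
-- ===== SOURCE B (Python) =====
-- def get_flipped(available_nums: [int]) -> str: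
--     """Gets flipped nums from available nums as one string (recursive)."""
--     avail = set(available_nums)
--
--     def digits_from(d: int) -> str:
--         if d > 9:
--             return ''
--         rest = digits_from(d + 1)
--         return rest if d in avail else str(d) + rest
--
--     s = digits_from(1)
--     return s if s else '0'
-- ===== Notes on version B (the rewrite author's own statement) =====
-- stated objective: alternative
-- what changed: B builds the result by recursion over the fixed digits 1..9 (prepending each digit absent from a set built once from available_nums), instead of A's two iterative passes that mutate a copy of [1..9] with remove() and then concatenate it.
import Mathlib
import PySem

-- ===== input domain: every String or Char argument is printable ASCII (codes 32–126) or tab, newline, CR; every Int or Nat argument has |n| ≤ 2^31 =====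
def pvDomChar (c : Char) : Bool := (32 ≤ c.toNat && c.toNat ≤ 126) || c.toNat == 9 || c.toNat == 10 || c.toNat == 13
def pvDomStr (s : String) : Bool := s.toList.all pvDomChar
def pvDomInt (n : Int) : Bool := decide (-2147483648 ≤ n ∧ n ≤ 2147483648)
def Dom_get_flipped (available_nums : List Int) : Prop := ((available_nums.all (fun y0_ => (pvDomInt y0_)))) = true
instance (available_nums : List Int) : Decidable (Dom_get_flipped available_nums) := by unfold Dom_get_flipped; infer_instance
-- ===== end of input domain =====

-- B builds the result by recursion over the fixed digits 1..9, prepending each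
-- digit absent from a set of available_nums, instead of A's two mutating passes.


-- ===== PORT A =====
def get_flipped (available_nums : List Int) : String :=
  let flipped_nums : List Int :=
    available_nums.foldl (fun fl num => if num ∈ fl then fl.erase num else fl)
      [1,2,3,4,5,6,7,8,9]
  let flipped_str := flipped_nums.foldl (fun s num => s ++ PySem.Int.toStr num) ""
  if flipped_str = "" then "0" else flipped_str

-- ===== PORT B =====
-- digitsAlt avail k = the string for digits (10-k)..9; k counts the digits still to do.
def digitsAlt (avail : PySem.Set Int) : Nat → String
  | 0 => ""
  | Nat.succ k =>
      let d : Int := 9 - (k : Int)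
      let rest := digitsAlt avail k
      if d ∈ avail then rest else PySem.Int.toStr d ++ rest

def get_flipped_alt (available_nums : List Int) : String :=
  let s := digitsAlt (PySem.Set.ofList available_nums) 9
  if s = "" then "0" else s

-- ===== PRECONDITION & SPEC =====
def Spec_get_flipped (available_nums : List Int) (out : String) : Prop := out = get_flipped_alt available_nums
instance (available_nums : List Int) (out : String) : Decidable (Spec_get_flipped available_nums out) := by unfold Spec_get_flipped; infer_instance

-- ===== CLAIM (what is proved, stated in full; the proofs are below) =====
def Claim_equal_get_flipped : Prop := ∀ (available_nums : List Int), Dom_get_flipped available_nums → Spec_get_flipped available_nums (get_flipped available_nums)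

-- ===== LEMMAS AND PROOFS =====

-- The digit list processed by B's recursion at depth k: (10-k)..9 as Ints.
def digitsList : Nat → List Int
  | 0 => []
  | Nat.succ k => (9 - (k : Int)) :: digitsList k

-- A's deletion loop over a duplicate-free state computes the filter of the state.
theorem pv_erase_loop (avail : List Int) :
    ∀ (l : List Int), l.Nodup →
      avail.foldl (fun fl num => if num ∈ fl then fl.erase num else fl) l
        = l.filter (fun x => x ∉ avail) := by
  induction avail with
  | nil => intro l _; simp
  | cons a rest ih =>
      intro l hl
      have hstep : (if a ∈ l then l.erase a else l) = l.filter (fun x => x ≠ a) := by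
        by_cases h : a ∈ l
        · rw [if_pos h, List.Nodup.erase_eq_filter hl]
          apply List.filter_congr
          intro x _
          by_cases hx : x = a
          · simp [hx]
          · simp [hx]
        · simp only [h, if_false]
          symm
          apply List.filter_eq_self.2
          intro x hx
          simp only [decide_eq_true_eq]
          intro hxa; exact h (hxa ▸ hx)
      have hnd : (if a ∈ l then l.erase a else l).Nodup := by
        split
        · exact hl.erase a
        · exact hl
      rw [List.foldl_cons, hstep, ih _ (hl.filter _), List.filter_filter]
      apply List.filter_congr
      intro x _
      by_cases h1 : x = a <;> by_cases h2 : x ∈ rest <;> simp [h1, h2]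

-- Folding string concatenation from an arbitrary seed splits off the seed.
theorem pv_foldl_append (l : List Int) :
    ∀ (s : String),
      l.foldl (fun s num => s ++ PySem.Int.toStr num) s
        = s ++ l.foldl (fun s num => s ++ PySem.Int.toStr num) "" := by
  induction l with
  | nil => intro s; simp
  | cons a rest ih =>
      intro s
      rw [List.foldl_cons, List.foldl_cons, ih (s ++ PySem.Int.toStr a),
          ih ("" ++ PySem.Int.toStr a)]
      simp [String.append_assoc]

-- B's recursion equals A's concatenation fold over the filtered digit list.
theorem pv_digitsAlt (avail : PySem.Set Int) :
    ∀ (k : Nat),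
      digitsAlt avail k
        = ((digitsList k).filter (fun x => x ∉ avail)).foldl
            (fun s num => s ++ PySem.Int.toStr num) "" := by
  intro k
  induction k with
  | zero => rfl
  | succ k ih =>
      simp only [digitsAlt, digitsList, List.filter_cons]
      by_cases h : (9 - (k : Int)) ∈ avail
      · simp [h, ih]
      · simp only [if_neg h, ih, h, not_false_iff, decide_true, if_true, List.foldl_cons]
        rw [pv_foldl_append _ ("" ++ PySem.Int.toStr (9 - (k : Int)))]
        simp [String.append_assoc]

-- ===== VERDICT (by name: the statement is the Claim_ definition above) =====
theorem get_flipped_spec : Claim_equal_get_flipped := by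
  intro avail _
  show get_flipped avail = get_flipped_alt avail
  simp only [get_flipped, get_flipped_alt]
  rw [pv_erase_loop avail [1,2,3,4,5,6,7,8,9] (by decide),
      pv_digitsAlt (PySem.Set.ofList avail) 9]
  have hl : digitsList 9 = [1,2,3,4,5,6,7,8,9] := by decide
  rw [hl]
  have hfil : (List.filter (fun x => decide (x ∉ avail)) ([1,2,3,4,5,6,7,8,9] : List Int))
      = List.filter (fun x => decide (x ∉ PySem.Set.ofList avail)) [1,2,3,4,5,6,7,8,9] := by
    apply List.filter_congr
    intro x _
    simp [PySem.Set.mem_ofList]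
  rw [hfil]
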